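-- pv_equiv track=rewrite | github.com/rakesh-suru/leetcode_solutions | solutions/1248-Count-Number-of-Nice-Subarrays/sol1.py | numberOfSubarrays
-- ===== SOURCE A (Python) =====
-- from typing import List
--
-- def numberOfSubarrays(nums: List[int], k: int) -> int:
--     ans = 0
--     for i in range(len(nums)):
--         odds = 0
--         for j in range(i, len(nums)):
--             if nums[j] % 2 == 1:
--                 odds += 1
--             if odds == k:
--                 ans += 1
--     return ans
-- ===== SOURCE B (Python) =====
-- def numberOfSubarrays(nums, k):
--     # prefix-count of odd numbers + hashmap of prefix frequencies: O(n)
--     cnt = {0: 1}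
--     odds = 0
--     ans = 0
--     for x in nums:
--         odds += x % 2
--         ans += cnt.get(odds - k, 0)
--         cnt[odds] = cnt.get(odds, 0) + 1
--     return ans
-- ===== Notes on version B (the rewrite author's own statement) =====
-- stated objective: faster
-- what changed: replaced the O(n^2) double loop over all start indices by a single pass keeping a hashmap of prefix odd-counts (ans += cnt[odds-k])
import Mathlib
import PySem

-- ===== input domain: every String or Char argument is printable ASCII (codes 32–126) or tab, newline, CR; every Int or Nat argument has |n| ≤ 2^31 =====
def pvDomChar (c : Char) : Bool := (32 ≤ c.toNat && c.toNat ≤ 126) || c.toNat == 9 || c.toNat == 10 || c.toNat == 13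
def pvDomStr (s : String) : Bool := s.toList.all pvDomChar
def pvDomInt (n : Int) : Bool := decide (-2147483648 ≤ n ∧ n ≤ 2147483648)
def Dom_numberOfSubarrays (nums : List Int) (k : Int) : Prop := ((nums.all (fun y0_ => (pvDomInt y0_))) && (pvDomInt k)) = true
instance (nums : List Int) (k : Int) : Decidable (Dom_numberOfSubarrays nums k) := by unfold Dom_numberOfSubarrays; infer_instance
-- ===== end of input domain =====

-- B replaces A's O(n^2) double loop by one left-to-right pass with a hashmap of prefix odd-counts.

-- ===== PORT A =====
def numberOfSubarrays (nums : List Int) (k : Int) : Int :=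
  (PySem.List.pyRange 0 (PySem.List.len nums) 1).foldl (fun ans i =>
    ((PySem.List.pyRange i (PySem.List.len nums) 1).foldl
      (fun (st : Int × Int) j =>
        let odds := if PySem.Int.mod (PySem.List.pyGetD nums j 0) 2 = 1 then st.1 + 1 else st.1
        (odds, if odds = k then st.2 + 1 else st.2))
      (0, ans)).2) 0

-- ===== PORT B =====
def numberOfSubarrays_alt (nums : List Int) (k : Int) : Int :=
  (nums.foldl (fun (st : PySem.Dict Int Int × Int × Int) x =>
      let odds := st.2.1 + PySem.Int.mod x 2
      let ans := st.2.2 + st.1.getD (odds - k) 0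
      (st.1.insert odds (st.1.getD odds 0 + 1), odds, ans))
    ((PySem.Dict.empty).insert 0 1, 0, 0)).2.2

-- ===== PRECONDITION & SPEC =====
def Spec_numberOfSubarrays (nums : List Int) (k : Int) (out : Int) : Prop := out = numberOfSubarrays_alt nums k
instance (nums : List Int) (k : Int) (out : Int) : Decidable (Spec_numberOfSubarrays nums k out) := by unfold Spec_numberOfSubarrays; infer_instance

-- ===== CLAIM (what is proved, stated in full; the proofs are below) =====
def Claim_equal_numberOfSubarrays : Prop := ∀ (nums : List Int) (k : Int), Dom_numberOfSubarrays nums k → Spec_numberOfSubarrays nums k (numberOfSubarrays nums k)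

-- ===== LEMMAS AND PROOFS =====

-- 0/1 odd indicator of x (= x % 2 in Python)
def oddv (x : Int) : Int := PySem.Int.mod x 2

-- A's inner-loop body, zeta-reduced (definitionally equal to the lambda in the port)
def innerStep (k : Int) (st : Int × Int) (x : Int) : Int × Int :=
  ((if PySem.Int.mod x 2 = 1 then st.1 + 1 else st.1),
   if (if PySem.Int.mod x 2 = 1 then st.1 + 1 else st.1) = k then st.2 + 1 else st.2)

-- B's loop body, zeta-reduced (definitionally equal to the lambda in the port)
def bStep (k : Int) (st : PySem.Dict Int Int × Int × Int) (x : Int) :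
    PySem.Dict Int Int × Int × Int :=
  (st.1.insert (st.2.1 + PySem.Int.mod x 2) (st.1.getD (st.2.1 + PySem.Int.mod x 2) 0 + 1),
   st.2.1 + PySem.Int.mod x 2,
   st.2.2 + st.1.getD (st.2.1 + PySem.Int.mod x 2 - k) 0)

-- number of nonempty prefixes of xs with odd-count k (one run of A's inner loop)
def gpref : List Int → Int → Int
  | [], _ => 0
  | x :: xs, k => (if oddv x = k then 1 else 0) + gpref xs (k - oddv x)

-- A's whole computation: sum of gpref over all suffixes
def aspec : List Int → Int → Int
  | [], _ => 0
  | x :: xs, k => gpref (x :: xs) k + aspec xs k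

-- B's computation with the dict abstracted to the list `hist` of recorded prefix odd-counts
def bspec : List Int → List Int → Int → Int → Int
  | [], _, _, _ => 0
  | x :: xs, hist, odds, k =>
      ((hist.count (odds + oddv x - k) : Int)) + bspec xs (hist ++ [odds + oddv x]) (odds + oddv x) k

theorem oddv_cases (x : Int) : oddv x = 0 ∨ oddv x = 1 := by
  unfold oddv PySem.Int.mod
  rw [Int.fmod_eq_emod]
  omega

-- A's inner loop computes gpref
theorem inner_eq (k : Int) :
    ∀ (xs : List Int) (odds0 ans0 : Int),
      (xs.foldl (innerStep k) (odds0, ans0)).2 = ans0 + gpref xs (k - odds0) := by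
  intro xs
  induction xs with
  | nil => intro odds0 ans0; simp [gpref]
  | cons x xs ih =>
    intro odds0 ans0
    simp only [List.foldl_cons]
    have h1 : innerStep k (odds0, ans0) x
        = (odds0 + oddv x, if odds0 + oddv x = k then ans0 + 1 else ans0) := by
      unfold innerStep oddv
      rcases oddv_cases x with h | h <;> unfold oddv at h <;> rw [h] <;> norm_num
    rw [h1, ih]
    have h2 : gpref (x :: xs) (k - odds0)
        = (if oddv x = k - odds0 then 1 else 0) + gpref xs (k - odds0 - oddv x) := rfl
    rw [h2]
    have h3 : k - (odds0 + oddv x) = k - odds0 - oddv x := by ring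
    by_cases hc : odds0 + oddv x = k
    · rw [if_pos hc, if_pos (by omega), h3]; ring
    · rw [if_neg hc, if_neg (by omega), h3]; ring

-- A's outer loop sums gpref over suffixes
theorem outer_eq (nums : List Int) (k : Int) :
    ∀ (m i : Nat) (a : Int), nums.length - i = m → i ≤ nums.length →
      (PySem.List.pyRange (i : Int) ((nums.length : Int)) 1).foldl (fun ans i =>
        ((PySem.List.pyRange i ((nums.length : Int)) 1).foldl
          (fun st j => innerStep k st (PySem.List.pyGetD nums j 0))
          (0, ans)).2) a
      = a + aspec (nums.drop i) k := by
  intro m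
  induction m with
  | zero =>
    intro i a hm hi
    have hie : i = nums.length := by omega
    subst hie
    rw [PySem.List.pyRange_one_eq_nil (by omega)]
    simp [aspec]
  | succ m ih =>
    intro i a hm hi
    have hlt : i < nums.length := by omega
    rw [PySem.List.pyRange_one_cons (by exact_mod_cast hlt)]
    simp only [List.foldl_cons]
    have hin : ((PySem.List.pyRange ((i : Int)) ((nums.length : Int)) 1).foldl
        (fun st j => innerStep k st (PySem.List.pyGetD nums j 0)) (0, a)).2
        = a + gpref (nums.drop i) k := by
      rw [PySem.List.foldl_pyRange_pyGetD' nums 0 (innerStep k) ((0:Int), a) (by positivity)]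
      rw [Int.toNat_natCast, inner_eq]
      simp
    rw [hin]
    have hcast : ((i : Int)) + 1 = (((i + 1 : Nat)) : Int) := by push_cast; ring
    rw [hcast, ih (i + 1) (a + gpref (nums.drop i) k) (by omega) (by omega)]
    have hdrop : nums.drop i = nums[i] :: nums.drop (i + 1) := List.drop_eq_getElem_cons hlt
    rw [hdrop]
    show a + gpref (nums[i] :: nums.drop (i + 1)) k + aspec (nums.drop (i + 1)) k
        = a + (gpref (nums[i] :: nums.drop (i + 1)) k + aspec (nums.drop (i + 1)) k)
    ring

-- B's fold computes bspec, via the dict-as-counter invariant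
theorem fold_eq_bspec (k : Int) :
    ∀ (rest : List Int) (cnt : PySem.Dict Int Int) (hist : List Int) (odds ans : Int),
      (∀ v, cnt.getD v 0 = (hist.count v : Int)) →
      ((rest.foldl (bStep k) (cnt, odds, ans)).2.2) = ans + bspec rest hist odds k := by
  intro rest
  induction rest with
  | nil => intro cnt hist odds ans hinv; simp [bspec]
  | cons x xs ih =>
    intro cnt hist odds ans hinv
    simp only [List.foldl_cons]
    have hstep : bStep k (cnt, odds, ans) x
        = (cnt.insert (odds + PySem.Int.mod x 2) (cnt.getD (odds + PySem.Int.mod x 2) 0 + 1),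
           odds + PySem.Int.mod x 2,
           ans + cnt.getD (odds + PySem.Int.mod x 2 - k) 0) := rfl
    rw [hstep]
    have hinv' : ∀ v, (cnt.insert (odds + PySem.Int.mod x 2)
        (cnt.getD (odds + PySem.Int.mod x 2) 0 + 1)).getD v 0
        = ((hist ++ [odds + PySem.Int.mod x 2]).count v : Int) := by
      intro v
      rw [PySem.Dict.getD_insert]
      by_cases hv : v = odds + PySem.Int.mod x 2
      · rw [if_pos hv, hinv, List.count_append, hv]
        simp
      · rw [if_neg hv, hinv, List.count_append]
        have h0 : ([odds + PySem.Int.mod x 2].count v) = 0 :=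
          List.count_eq_zero.mpr (by simpa using hv)
        rw [h0]
        simp
    rw [ih _ (hist ++ [odds + PySem.Int.mod x 2]) _ _ hinv']
    have hb : bspec (x :: xs) hist odds k
        = ((hist.count (odds + oddv x - k) : Int))
          + bspec xs (hist ++ [odds + oddv x]) (odds + oddv x) k := rfl
    rw [hb]
    unfold oddv
    rw [hinv]
    ring

-- sum of 0/1 indicators is a count
theorem sum_ind_eq_count (c : Int) :
    ∀ (hist : List Int), ((hist.map (fun v => if v = c then (1:Int) else 0)).sum) = (hist.count c : Int) := by
  intro hist
  induction hist with
  | nil => simp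
  | cons h t ih =>
    by_cases hc : h = c
    · simp [hc, ih]; ring
    · simp [hc, ih]

theorem map_sum_add (p q : Int → Int) :
    ∀ (l : List Int), (l.map (fun v => p v + q v)).sum = (l.map p).sum + (l.map q).sum := by
  intro l
  induction l with
  | nil => simp
  | cons h t ih => simp [ih]; ring

theorem aspec_cons_drop (xs : List Int) (k : Int) :
    aspec xs k = gpref xs k + aspec (xs.drop 1) k := by
  cases xs with
  | nil => simp [aspec, gpref]
  | cons y ys => rfl

-- bspec in closed form: contributions of recorded prefixes plus pairs fully inside `rest`
theorem bspec_eq (k : Int) :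
    ∀ (rest : List Int) (hist : List Int) (odds : Int),
      bspec rest hist odds k
        = (hist.map (fun v => gpref rest (k - odds + v))).sum + aspec (rest.drop 1) k := by
  intro rest
  induction rest with
  | nil =>
    intro hist odds
    have h0 : (hist.map (fun v => gpref [] (k - odds + v))) = hist.map (fun _ => (0:Int)) := by
      simp [gpref]
    simp [bspec, aspec, h0]
  | cons x xs ih =>
    intro hist odds
    have hb : bspec (x :: xs) hist odds k
        = ((hist.count (odds + oddv x - k) : Int))
          + bspec xs (hist ++ [odds + oddv x]) (odds + oddv x) k := rfl
    rw [hb, ih]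
    have hmapapp : ((hist ++ [odds + oddv x]).map (fun v => gpref xs (k - (odds + oddv x) + v))).sum
        = (hist.map (fun v => gpref xs (k - (odds + oddv x) + v))).sum + gpref xs k := by
      rw [List.map_append, List.sum_append]
      simp
    rw [hmapapp]
    have hg : (fun v => gpref (x :: xs) (k - odds + v))
        = fun v => (if v = odds + oddv x - k then (1:Int) else 0)
              + gpref xs (k - (odds + oddv x) + v) := by
      funext v
      have he : gpref (x :: xs) (k - odds + v)
          = (if oddv x = k - odds + v then 1 else 0) + gpref xs (k - odds + v - oddv x) := rfl
      rw [he]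
      have harg : k - odds + v - oddv x = k - (odds + oddv x) + v := by ring
      rw [harg]
      by_cases hc : oddv x = k - odds + v
      · rw [if_pos hc, if_pos (by omega)]
      · rw [if_neg hc, if_neg (by omega)]
    rw [hg, map_sum_add, sum_ind_eq_count]
    simp only [List.drop_succ_cons, List.drop_zero]
    rw [aspec_cons_drop xs k]
    ring

theorem numberOfSubarrays_eq_aspec (nums : List Int) (k : Int) :
    numberOfSubarrays nums k = aspec nums k := by
  unfold numberOfSubarrays
  simp only [PySem.List.len_eq]
  show (PySem.List.pyRange (((0:Nat) : Int)) ((nums.length : Int)) 1).foldl (fun ans i =>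
      ((PySem.List.pyRange i ((nums.length : Int)) 1).foldl
        (fun st j => innerStep k st (PySem.List.pyGetD nums j 0))
        (0, ans)).2) 0 = aspec nums k
  rw [outer_eq nums k nums.length 0 0 (by omega) (by omega)]
  simp

theorem numberOfSubarrays_alt_eq_aspec (nums : List Int) (k : Int) :
    numberOfSubarrays_alt nums k = aspec nums k := by
  unfold numberOfSubarrays_alt
  show (nums.foldl (bStep k) ((PySem.Dict.empty).insert 0 1, 0, 0)).2.2 = aspec nums k
  have hinv : ∀ v, ((PySem.Dict.empty).insert (0:Int) (1:Int)).getD v 0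
      = (([ (0:Int) ].count v : Int)) := by
    intro v
    rw [PySem.Dict.getD_insert]
    by_cases hv : v = 0
    · rw [if_pos hv, hv]; simp
    · rw [if_neg hv]
      have h0 : (([ (0:Int) ].count v)) = 0 := List.count_eq_zero.mpr (by simpa using hv)
      rw [h0]
      simp [PySem.Dict.getD_empty]
  rw [fold_eq_bspec k nums _ [0] 0 0 hinv, bspec_eq]
  simp only [List.map_singleton, List.sum_singleton]
  have h0 : k - 0 + 0 = k := by ring
  rw [h0, zero_add, ← aspec_cons_drop]

-- ===== VERDICT (by name: the statement is the Claim_ definition above) =====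
theorem numberOfSubarrays_spec : Claim_equal_numberOfSubarrays := by
  intro nums k _
  unfold Spec_numberOfSubarrays
  rw [numberOfSubarrays_eq_aspec, numberOfSubarrays_alt_eq_aspec]
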